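-- pv_equiv track=rewrite | github.com/ericjeonnnnnn/cortex_reranker | rerank_window.py | sliding_spans
-- ===== SOURCE A (Python) =====
-- def sliding_spans(k: int, window: int, stride: int, scan: str):
--     if k <= 0 or window <= 0:
--         return []
--     if window >= k:
--         return [(0, k)]
--     spans = []
--     if scan == "tail":
--         st = max(0, k - window)
--         while st >= 0:
--             spans.append((st, st + window))
--             st -= stride
--         spans.reverse()
--     else:
--         st = 0
--         while st < k:
--             spans.append((st, min(k, st + window)))
--             st += stride
--     return spans
-- ===== SOURCE B (Python) =====
-- def sliding_spans(k: int, window: int, stride: int, scan: str):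
--     if k <= 0 or window <= 0:
--         return []
--     if window >= k:
--         return [(0, k)]
--     if scan == "tail":
--         n = (k - window) // stride + 1
--         off = (k - window) - (n - 1) * stride
--         return [(off + i * stride, off + i * stride + window) for i in range(n)]
--     n = -(-k // stride)  # ceil(k / stride)
--     return [(i * stride, min(k, i * stride + window)) for i in range(n)]
-- ===== Notes on version B (the rewrite author's own statement) =====
-- stated objective: simpler
-- what changed: Instead of marching a start cursor in a while-loop (descending then reversing in the tail case), B first computes the span COUNT n in closed form (ceiling/floor division) and the aligned first start, then generates the i-th span directly from its index i in range(n); no cursor state and no reversal.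
import Mathlib
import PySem

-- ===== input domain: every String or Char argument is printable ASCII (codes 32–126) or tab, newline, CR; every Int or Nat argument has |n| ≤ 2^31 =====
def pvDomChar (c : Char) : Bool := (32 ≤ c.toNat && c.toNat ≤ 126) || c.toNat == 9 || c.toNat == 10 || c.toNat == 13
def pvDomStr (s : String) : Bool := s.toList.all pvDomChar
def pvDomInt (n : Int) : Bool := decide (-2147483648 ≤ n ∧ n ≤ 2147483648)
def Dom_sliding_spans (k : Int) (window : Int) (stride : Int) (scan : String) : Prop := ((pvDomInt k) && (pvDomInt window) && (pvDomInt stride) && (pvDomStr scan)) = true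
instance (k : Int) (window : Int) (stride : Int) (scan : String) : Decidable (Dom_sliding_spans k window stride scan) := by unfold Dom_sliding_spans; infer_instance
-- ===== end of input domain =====

-- B replaces A's cursor-marching while-loops (descending then reversed in the tail case) by a
-- count-then-index construction: the number of spans n is computed in closed form, and the i-th
-- span is generated directly from its index i (objective: simpler).

-- ===== PORT A =====
-- while st < k: spans.append((st, min(k, st+window))); st += stride
-- (the 'stride ≤ 0' branch is only a totality guard: Python loops forever there, excluded by Pre_)
def pvHeadLoopA (k window stride : Int) (st : Int) (acc : List (Int × Int)) : List (Int × Int) :=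
  if st < k then
    if 0 < stride then
      pvHeadLoopA k window stride (st + stride) (acc ++ [(st, min k (st + window))])
    else acc
  else acc
termination_by (k - st).toNat
decreasing_by omega

-- while st >= 0: spans.append((st, st+window)); st -= stride
-- (the 'stride ≤ 0' branch is only a totality guard: Python loops forever there, excluded by Pre_)
def pvTailLoopA (window stride : Int) (st : Int) (acc : List (Int × Int)) : List (Int × Int) :=
  if 0 ≤ st then
    if 0 < stride then
      pvTailLoopA window stride (st - stride) (acc ++ [(st, st + window)])
    else acc
  else acc
termination_by (st + 1).toNat
decreasing_by omega

def sliding_spans (k : Int) (window : Int) (stride : Int) (scan : String) : List (Int × Int) :=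
  if k ≤ 0 ∨ window ≤ 0 then []
  else if k ≤ window then [(0, k)]
  else if scan = "tail" then (pvTailLoopA window stride (max 0 (k - window)) []).reverse
  else pvHeadLoopA k window stride 0 []

-- ===== PORT B =====
def sliding_spans_alt (k : Int) (window : Int) (stride : Int) (scan : String) : List (Int × Int) :=
  if k ≤ 0 ∨ window ≤ 0 then []
  else if k ≤ window then [(0, k)]
  else if scan = "tail" then
    let n := PySem.Int.floordiv (k - window) stride + 1
    let off := (k - window) - (n - 1) * stride
    (PySem.List.pyRange 0 n 1).map (fun i => (off + i * stride, off + i * stride + window))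
  else
    let n := -(PySem.Int.floordiv (-k) stride)  -- ceil(k / stride)
    (PySem.List.pyRange 0 n 1).map (fun i => (i * stride, min k (i * stride + window)))

-- ===== PRECONDITION & SPEC =====
-- Pre_ excludes only stride ≤ 0 when a loop is actually entered: there Python A loops forever
-- (never returns), so nothing is claimed.
def Pre_sliding_spans (k : Int) (window : Int) (stride : Int) (scan : String) : Prop :=
  k ≤ 0 ∨ window ≤ 0 ∨ k ≤ window ∨ 0 < stride
instance (k : Int) (window : Int) (stride : Int) (scan : String) : Decidable (Pre_sliding_spans k window stride scan) := by unfold Pre_sliding_spans; infer_instance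
def pvWitness_sliding_spans : Int × Int × Int × String := (10, 4, 3, "tail")

def Spec_sliding_spans (k : Int) (window : Int) (stride : Int) (scan : String) (out : List (Int × Int)) : Prop := out = sliding_spans_alt k window stride scan
instance (k : Int) (window : Int) (stride : Int) (scan : String) (out : List (Int × Int)) : Decidable (Spec_sliding_spans k window stride scan out) := by unfold Spec_sliding_spans; infer_instance

-- ===== CLAIM (what is proved, stated in full; the proofs are below) =====
def Claim_equal_sliding_spans : Prop := ∀ (k : Int) (window : Int) (stride : Int) (scan : String), Dom_sliding_spans k window stride scan → Pre_sliding_spans k window stride scan → Spec_sliding_spans k window stride scan (sliding_spans k window stride scan)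

-- ===== LEMMAS AND PROOFS =====

-- pyRange with a positive step is empty when the range is empty
lemma pvRange_nil (a b s : Int) (hs : 0 < s) (h : b ≤ a) :
    PySem.List.pyRange a b s = [] := by
  rw [PySem.List.pyRange_of_pos a b hs]
  simp [show ¬ a < b by omega]

-- pyRange with a positive step peels its first element
lemma pvRange_cons (a b s : Int) (hs : 0 < s) (h : a < b) :
    PySem.List.pyRange a b s = a :: PySem.List.pyRange (a + s) b s := by
  rw [PySem.List.pyRange_of_pos a b hs, PySem.List.pyRange_of_pos (a + s) b hs]
  have hx : b - a + s - 1 = (b - a - 1) + 1 * s := by ring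
  have hdiv : (b - a + s - 1) / s = (b - a - 1) / s + 1 := by
    rw [hx, Int.add_mul_ediv_right _ _ (by omega : s ≠ 0)]
  have hnn : 0 ≤ (b - a - 1) / s := Int.ediv_nonneg (by omega) (by omega)
  have hcount : ((b - a + s - 1) / s).toNat = ((b - a - 1) / s).toNat + 1 := by omega
  by_cases h2 : a + s < b
  · have : b - (a + s) + s - 1 = b - a - 1 := by ring
    simp only [if_pos h, if_pos h2, hcount, this, List.range_succ_eq_map, List.map_cons,
      List.map_map]
    congr 1
    · push_cast; ring
    · apply List.map_congr_left
      intro x _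
      simp only [Function.comp]
      push_cast; ring
  · have hz : (b - a - 1) / s = 0 := Int.ediv_eq_zero_of_lt (by omega) (by omega)
    simp only [if_pos h, if_neg h2, hcount, hz]
    simp

-- the head loop is a map over the forward range
lemma pvHeadLoopA_eq (k window s : Int) (hs : 0 < s) :
    ∀ (st : Int) (acc : List (Int × Int)),
      pvHeadLoopA k window s st acc
        = acc ++ (PySem.List.pyRange st k s).map (fun x => (x, min k (x + window))) := by
  intro st
  induction h : (k - st).toNat using Nat.strong_induction_on generalizing st with
  | _ n ih =>
    intro acc
    rw [pvHeadLoopA]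
    by_cases hlt : st < k
    · rw [if_pos hlt, if_pos hs, ih (k - (st + s)).toNat (by omega) (st + s) rfl,
          pvRange_cons st k s hs hlt]
      simp
    · rw [if_neg hlt, pvRange_nil st k s hs (by omega)]
      simp

-- splitting off the last element of an aligned positive-step range
lemma pvRange_snoc (s : Int) (hs : 0 < s) :
    ∀ (a t : Int), a ≤ t → s ∣ t - a →
      PySem.List.pyRange a (t + 1) s = PySem.List.pyRange a (t - s + 1) s ++ [t] := by
  intro a t
  induction h : (t - a).toNat using Nat.strong_induction_on generalizing a with
  | _ n ih =>
    intro hle hdvd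
    rw [pvRange_cons a (t + 1) s hs (by omega)]
    by_cases hat : a = t
    · subst hat
      rw [pvRange_nil (a + s) (a + 1) s hs (by omega),
          pvRange_nil a (a - s + 1) s hs (by omega)]
      simp
    · have hlt : a < t := lt_of_le_of_ne hle hat
      have hsle : s ≤ t - a := Int.le_of_dvd (by omega) hdvd
      have hrec := ih (t - (a + s)).toNat (by omega) (a + s) rfl (by omega)
        (by obtain ⟨c, hc⟩ := hdvd; exact ⟨c - 1, by rw [mul_sub, mul_one]; omega⟩)
      rw [hrec, pvRange_cons a (t - s + 1) s hs (by omega)]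
      simp

-- the tail loop accumulates, in descending order, exactly the reversed aligned range
lemma pvTailLoopA_eq (window s : Int) (hs : 0 < s) :
    ∀ (st : Int) (acc : List (Int × Int)),
      pvTailLoopA window s st acc
        = acc ++ ((PySem.List.pyRange (PySem.Int.mod st s) (st + 1) s).map
            (fun x => (x, x + window))).reverse := by
  intro st
  induction h : (st + 1).toNat using Nat.strong_induction_on generalizing st with
  | _ n ih =>
    intro acc
    rw [pvTailLoopA]
    by_cases hnn : 0 ≤ st
    · rw [if_pos hnn, if_pos hs, ih (st - s + 1).toNat (by omega) (st - s) rfl]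
      have hmod : PySem.Int.mod (st - s) s = PySem.Int.mod st s := by
        rw [PySem.Int.mod_eq_emod_of_pos hs, PySem.Int.mod_eq_emod_of_pos hs,
            Int.sub_emod_right]
      have hoff0 : 0 ≤ st % s := Int.emod_nonneg st (by omega)
      have hoffle : st % s ≤ st := by
        by_cases hcase : s ≤ st
        · have := Int.emod_lt_of_pos st hs; omega
        · rw [Int.emod_eq_of_lt hnn (by omega)]
      have hdvd : s ∣ st - st % s := ⟨st / s, by rw [Int.emod_def]; ring⟩
      have hsnoc := pvRange_snoc s hs (st % s) st hoffle hdvd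
      rw [hmod, PySem.Int.mod_eq_emod_of_pos hs, hsnoc]
      simp
    · rw [if_neg hnn,
          pvRange_nil (PySem.Int.mod st s) (st + 1) s hs
            (by have := PySem.Int.mod_nonneg st hs; omega)]
      simp

-- a positive-step range is the image of range(0, count) under i ↦ a + i*s
lemma pvRange_as_indexed (a b s : Int) (hs : 0 < s) :
    PySem.List.pyRange a b s
      = (PySem.List.pyRange 0 ((b - a + s - 1) / s) 1).map (fun i => a + i * s) := by
  rw [PySem.List.pyRange_of_pos a b hs, PySem.List.pyRange_one, List.map_map]
  by_cases h : a < b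
  · rw [if_pos h]
    simp only [sub_zero]
    apply List.map_congr_left
    intro x _
    simp [Function.comp]
    ring
  · rw [if_neg h]
    have hle : (b - a + s - 1) / s ≤ 0 := by
      by_cases h0 : 0 ≤ b - a + s - 1
      · rw [Int.ediv_eq_zero_of_lt h0 (by omega)]
      · by_contra hpos
        have := (Int.le_ediv_iff_mul_le hs).mp (by omega : (0:Int) ≤ (b - a + s - 1) / s)
        omega
    rw [show ((b - a + s - 1) / s - 0).toNat = 0 from by omega]
    simp

-- the tail branch: A's reversed descending loop equals B's indexed forward construction
lemma pv_tail_eq (k window s : Int) (hs : 0 < s) (hkw : 0 < k - window) :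
    (pvTailLoopA window s (max 0 (k - window)) []).reverse
      = (PySem.List.pyRange 0 (PySem.Int.floordiv (k - window) s + 1) 1).map
          (fun i => ((k - window) - (PySem.Int.floordiv (k - window) s + 1 - 1) * s + i * s,
                     (k - window) - (PySem.Int.floordiv (k - window) s + 1 - 1) * s + i * s + window)) := by
  set m := k - window with hm
  have hq : s * (m / s) + m % s = m := Int.mul_ediv_add_emod m s
  have hr0 : 0 ≤ m % s := Int.emod_nonneg m (by omega)
  have hprod : (m / s + 1 - 1) * s = s * (m / s) := by ring
  have hfd : PySem.Int.floordiv m s = m / s := PySem.Int.floordiv_eq_ediv_of_pos hs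
  rw [show max 0 m = m from by omega,
      pvTailLoopA_eq window s hs m [], List.nil_append, List.reverse_reverse,
      PySem.Int.mod_eq_emod_of_pos hs,
      pvRange_as_indexed (m % s) (m + 1) s hs, List.map_map]
  have hcount : (m + 1 - m % s + s - 1) / s = m / s + 1 := by
    have h1 : m + 1 - m % s + s - 1 = s * (m / s) + 1 * s := by omega
    rw [h1, Int.add_mul_ediv_right _ _ (by omega : s ≠ 0),
        Int.mul_ediv_cancel_left _ (by omega : s ≠ 0)]
  rw [hcount, hfd]
  apply List.map_congr_left
  intro x _
  simp only [Function.comp]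
  have : m - (m / s + 1 - 1) * s = m % s := by omega
  rw [this]

-- the head branch: A's forward cursor loop equals B's indexed construction with a ceiling count
lemma pv_head_eq (k window s : Int) (hs : 0 < s) :
    pvHeadLoopA k window s 0 []
      = (PySem.List.pyRange 0 (-(PySem.Int.floordiv (-k) s)) 1).map
          (fun i => (i * s, min k (i * s + window))) := by
  have hn : -(PySem.Int.floordiv (-k) s) = (k - 0 + s - 1) / s := by
    rw [PySem.Int.neg_floordiv_neg_eq_iff_of_pos hs]
    have hq : s * ((k + s - 1) / s) + (k + s - 1) % s = k + s - 1 :=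
      Int.mul_ediv_add_emod _ _
    have hr0 : 0 ≤ (k + s - 1) % s := Int.emod_nonneg _ (by omega)
    have hr1 : (k + s - 1) % s < s := Int.emod_lt_of_pos _ hs
    have h1 : ((k - 0 + s - 1) / s - 1) * s = s * ((k + s - 1) / s) - s := by
      rw [show k - 0 + s - 1 = k + s - 1 from by ring]; ring
    have h2 : ((k - 0 + s - 1) / s) * s = s * ((k + s - 1) / s) := by
      rw [show k - 0 + s - 1 = k + s - 1 from by ring]; ring
    omega
  rw [pvHeadLoopA_eq k window s hs 0 [], List.nil_append,
      pvRange_as_indexed 0 k s hs, List.map_map, hn]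
  apply List.map_congr_left
  intro x _
  simp [Function.comp]

-- ===== VERDICT (by name: the statement is the Claim_ definition above) =====
theorem sliding_spans_spec : Claim_equal_sliding_spans := by
  intro k window stride scan _ hpre
  unfold Spec_sliding_spans sliding_spans sliding_spans_alt
  by_cases h1 : k ≤ 0 ∨ window ≤ 0
  · simp [h1]
  · rw [if_neg h1, if_neg h1]
    by_cases h2 : k ≤ window
    · simp [h2]
    · rw [if_neg h2, if_neg h2]
      have hs : 0 < stride := by
        rcases hpre with h | h | h | h <;> first | exact h | omega
      by_cases h3 : scan = "tail"
      · rw [if_pos h3, if_pos h3]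
        exact pv_tail_eq k window stride hs (by omega)
      · rw [if_neg h3, if_neg h3]
        exact pv_head_eq k window stride hs
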